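-- pv_equiv track=rewrite | github.com/Agentic-Environmental-Engineering/GymVerse | gem/gem/envs/RLVE/bounded_interval_intersection_env.py | _solve_reference
-- ===== SOURCE A (Python) =====
-- import heapq
-- from typing import Any, List, Optional, SupportsFloat, Tuple
--
-- def _solve_reference(intervals: List[Tuple[int, int]], K: int) -> int:
--     """Compute the number of non-empty subsets whose intersection length is at least K.
--
--     This implements the same algorithm as the original RLVE environment:
--     - Sort intervals by left endpoint.
--     - Maintain a min-heap of right endpoints of intervals that can pair with the current interval
--       to achieve intersection length at least K.
--     - Count subsets uniquely by designating the interval with the maximum left endpoint in the subset.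
--     """
--     intervals_sorted = sorted(intervals, key=lambda x: x[0])
--
--     heap: List[int] = []
--     ans = 0
--
--     for l, r in intervals_sorted:
--         if r - l >= K:
--             # Remove intervals whose right endpoint is too small to intersect [l, l+K] with length >= K
--             while heap and heap[0] < l + K:
--                 heapq.heappop(heap)
--             # Each subset includes current interval plus any subset of the eligible previous intervals
--             ans += pow(2, len(heap))
--             heapq.heappush(heap, r)
--
--     return ans
-- ===== SOURCE B (Python) =====
-- def _solve_reference(intervals, K):
--     # One pass over the intervals sorted by left endpoint: for each qualifying
--     # interval count directly, over the plain list of previously seen qualifying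
--     # right endpoints, how many reach l + K (no heap, no lazy eviction).
--     good = [(l, r) for l, r in sorted(intervals, key=lambda p: p[0]) if r - l >= K]
--     ans = 0
--     seen = []  # right endpoints of earlier qualifying intervals
--     for l, r in good:
--         c = sum(1 for r2 in seen if r2 >= l + K)
--         ans += 2 ** c
--         seen.append(r)
--     return ans
-- ===== Notes on version B (the rewrite author's own statement) =====
-- stated objective: simpler
-- what changed: Replaces the min-heap with lazy eviction by a plain list of previously seen qualifying right endpoints and a direct count of those reaching l+K, exploiting that the eviction thresholds l+K are nondecreasing.
import Mathlib
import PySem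

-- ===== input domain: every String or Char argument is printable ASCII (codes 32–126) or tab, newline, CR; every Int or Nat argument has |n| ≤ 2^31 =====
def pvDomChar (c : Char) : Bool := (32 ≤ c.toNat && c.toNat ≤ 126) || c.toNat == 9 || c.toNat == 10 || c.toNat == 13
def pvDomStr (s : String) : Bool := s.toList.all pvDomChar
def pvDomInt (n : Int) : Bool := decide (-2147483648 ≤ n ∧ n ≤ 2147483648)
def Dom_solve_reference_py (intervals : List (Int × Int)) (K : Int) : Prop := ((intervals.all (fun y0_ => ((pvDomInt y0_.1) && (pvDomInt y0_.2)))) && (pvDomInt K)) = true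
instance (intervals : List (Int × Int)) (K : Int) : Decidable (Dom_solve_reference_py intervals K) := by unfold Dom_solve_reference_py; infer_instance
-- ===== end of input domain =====

-- B replaces A's min-heap with lazy eviction by a plain list of previously seen qualifying
-- right endpoints and a direct count of those reaching l+K (objective: simpler).

-- ===== PORT A =====
-- Python's heapq (an array-encoded binary min-heap) is ported by hand as a merge-based
-- binary min-heap tree. This is exact for the operations A performs — heappush, heappop,
-- heap[0] (peek the minimum) and len(heap) — on ints: each of their observable results
-- depends only on the multiset of stored elements, which both representations maintain.
inductive PyHeap : Type
  | nil : PyHeap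
  | node : Int → PyHeap → PyHeap → PyHeap
deriving DecidableEq, Repr

def PyHeap.size : PyHeap → Nat
  | .nil => 0
  | .node _ l r => 1 + l.size + r.size

-- merging two heap-ordered trees; the Nat argument is fuel only (merge passes the total
-- size, which the recursion never exhausts), so the definition is structural
def PyHeap.mergeFuel : Nat → PyHeap → PyHeap → PyHeap
  | 0, h1, _ => h1
  | _ + 1, .nil, h2 => h2
  | _ + 1, .node a l r, .nil => .node a l r
  | n + 1, .node a l1 r1, .node b l2 r2 =>
      if a ≤ b then .node a l1 (PyHeap.mergeFuel n r1 (.node b l2 r2))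
      else .node b l2 (PyHeap.mergeFuel n (.node a l1 r1) r2)

def PyHeap.merge (h1 h2 : PyHeap) : PyHeap := PyHeap.mergeFuel (h1.size + h2.size) h1 h2

-- heappush x: merge with a singleton heap
def PyHeap.push (h : PyHeap) (x : Int) : PyHeap := PyHeap.merge h (.node x .nil .nil)

-- the `while heap and heap[0] < t: heapq.heappop(heap)` loop; heappop removes the root
-- and merges its children; the Nat argument is fuel only (evict passes the heap size,
-- which each pop decreases, so the fuel is never exhausted)
def PyHeap.evictFuel : Nat → PyHeap → Int → PyHeap
  | 0, h, _ => h
  | _ + 1, .nil, _ => .nil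
  | n + 1, .node v l r, t =>
      if v < t then PyHeap.evictFuel n (PyHeap.merge l r) t else .node v l r

def PyHeap.evict (h : PyHeap) (t : Int) : PyHeap := PyHeap.evictFuel h.size h t

def solve_reference_py (intervals : List (Int × Int)) (K : Int) : Int :=
  let intervals_sorted := PySem.List.sorted intervals (fun x => x.1) false
  (intervals_sorted.foldl
    (fun (s : PyHeap × Int) p =>
      if K ≤ p.2 - p.1 then
        let h := PyHeap.evict s.1 (p.1 + K)
        (h.push p.2, s.2 + 2 ^ h.size)
      else s)
    (.nil, 0)).2

-- ===== PORT B =====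
def solve_reference_py_alt (intervals : List (Int × Int)) (K : Int) : Int :=
  let good := (PySem.List.sorted intervals (fun p => p.1) false).filter
      (fun p => decide (K ≤ p.2 - p.1))
  (good.foldl
    (fun (s : Int × List Int) p =>
      (s.1 + 2 ^ (s.2.countP (fun r2 => decide (p.1 + K ≤ r2))), s.2 ++ [p.2]))
    (0, [])).1

-- ===== PRECONDITION & SPEC =====
def Spec_solve_reference_py (intervals : List (Int × Int)) (K : Int) (out : Int) : Prop := out = solve_reference_py_alt intervals K
instance (intervals : List (Int × Int)) (K : Int) (out : Int) : Decidable (Spec_solve_reference_py intervals K out) := by unfold Spec_solve_reference_py; infer_instance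

-- ===== CLAIM (what is proved, stated in full; the proofs are below) =====
def Claim_equal_solve_reference_py : Prop := ∀ (intervals : List (Int × Int)) (K : Int), Dom_solve_reference_py intervals K → Spec_solve_reference_py intervals K (solve_reference_py intervals K)

-- ===== LEMMAS AND PROOFS =====

def PyHeap.toMul : PyHeap → Multiset Int
  | .nil => 0
  | .node v l r => v ::ₘ (l.toMul + r.toMul)

def PyHeap.IsHeap : PyHeap → Prop
  | .nil => True
  | .node v l r => (∀ x ∈ l.toMul, v ≤ x) ∧ (∀ x ∈ r.toMul, v ≤ x) ∧ l.IsHeap ∧ r.IsHeap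

theorem PyHeap.size_eq_card (h : PyHeap) : h.size = h.toMul.card := by
  induction h with
  | nil => simp [PyHeap.size, PyHeap.toMul]
  | node v l r ihl ihr => simp [PyHeap.size, PyHeap.toMul, ihl, ihr]; omega

theorem PyHeap.size_eq_zero (h : PyHeap) (hz : h.size = 0) : h = .nil := by
  cases h with
  | nil => rfl
  | node v l r => simp [PyHeap.size] at hz

theorem PyHeap.toMul_mergeFuel (n : Nat) : ∀ (a b : PyHeap), a.size + b.size ≤ n →
    (PyHeap.mergeFuel n a b).toMul = a.toMul + b.toMul := by
  induction n with
  | zero =>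
      intro a b hn
      have hb : b = .nil := PyHeap.size_eq_zero b (by omega)
      subst hb
      simp [PyHeap.mergeFuel, PyHeap.toMul]
  | succ n ih =>
      intro a b hn
      cases a with
      | nil => simp [PyHeap.mergeFuel, PyHeap.toMul]
      | node a l1 r1 =>
        cases b with
        | nil => simp [PyHeap.mergeFuel, PyHeap.toMul]
        | node b l2 r2 =>
          simp only [PyHeap.size] at hn
          rw [PyHeap.mergeFuel]
          by_cases hle : a ≤ b
          · simp only [hle, if_true, PyHeap.toMul]
            rw [ih r1 (.node b l2 r2) (by simp only [PyHeap.size]; omega)]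
            simp only [PyHeap.toMul, ← Multiset.singleton_add]; abel
          · simp only [hle, if_false, PyHeap.toMul]
            rw [ih (.node a l1 r1) r2 (by simp only [PyHeap.size]; omega)]
            simp only [PyHeap.toMul, ← Multiset.singleton_add]; abel

theorem PyHeap.toMul_merge (a b : PyHeap) : (PyHeap.merge a b).toMul = a.toMul + b.toMul :=
  PyHeap.toMul_mergeFuel _ a b le_rfl

theorem PyHeap.size_merge (a b : PyHeap) : (PyHeap.merge a b).size = a.size + b.size := by
  rw [PyHeap.size_eq_card, PyHeap.toMul_merge, Multiset.card_add,
    ← PyHeap.size_eq_card, ← PyHeap.size_eq_card]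

theorem PyHeap.isHeap_mergeFuel (n : Nat) : ∀ (a b : PyHeap), a.size + b.size ≤ n →
    a.IsHeap → b.IsHeap → (PyHeap.mergeFuel n a b).IsHeap := by
  induction n with
  | zero => intro a b _ ha _; exact ha
  | succ n ih =>
      intro a b hn ha hb
      cases a with
      | nil => simpa [PyHeap.mergeFuel]
      | node a l1 r1 =>
        cases b with
        | nil => simpa [PyHeap.mergeFuel]
        | node b l2 r2 =>
          simp only [PyHeap.size] at hn
          obtain ⟨h1, h2, h3, h4⟩ := ha
          obtain ⟨g1, g2, g3, g4⟩ := hb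
          rw [PyHeap.mergeFuel]
          by_cases hle : a ≤ b
          · simp only [hle, if_true]
            refine ⟨h1, ?_, h3, ih r1 (.node b l2 r2) (by simp only [PyHeap.size]; omega)
              h4 ⟨g1, g2, g3, g4⟩⟩
            intro x hx
            rw [PyHeap.toMul_mergeFuel n r1 (.node b l2 r2)
              (by simp only [PyHeap.size]; omega)] at hx
            rcases Multiset.mem_add.mp hx with hx | hx
            · exact h2 x hx
            · simp only [PyHeap.toMul, Multiset.mem_cons, Multiset.mem_add] at hx
              rcases hx with rfl | hx | hx
              · exact hle
              · exact le_trans hle (g1 x hx)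
              · exact le_trans hle (g2 x hx)
          · simp only [hle, if_false]
            have hba : b ≤ a := le_of_not_ge (by omega)
            refine ⟨g1, ?_, g3, ih (.node a l1 r1) r2 (by simp only [PyHeap.size]; omega)
              ⟨h1, h2, h3, h4⟩ g4⟩
            intro x hx
            rw [PyHeap.toMul_mergeFuel n (.node a l1 r1) r2
              (by simp only [PyHeap.size]; omega)] at hx
            rcases Multiset.mem_add.mp hx with hx | hx
            · simp only [PyHeap.toMul, Multiset.mem_cons, Multiset.mem_add] at hx
              rcases hx with rfl | hx | hx
              · exact hba
              · exact le_trans hba (h1 x hx)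
              · exact le_trans hba (h2 x hx)
            · exact g2 x hx

theorem PyHeap.isHeap_merge (a b : PyHeap) (ha : a.IsHeap) (hb : b.IsHeap) :
    (PyHeap.merge a b).IsHeap :=
  PyHeap.isHeap_mergeFuel _ a b le_rfl ha hb

theorem PyHeap.isHeap_push (h : PyHeap) (x : Int) (hh : h.IsHeap) : (h.push x).IsHeap := by
  apply PyHeap.isHeap_merge _ _ hh
  simp [PyHeap.IsHeap, PyHeap.toMul]

theorem PyHeap.toMul_push (h : PyHeap) (x : Int) : (h.push x).toMul = x ::ₘ h.toMul := by
  simp only [PyHeap.push, PyHeap.toMul_merge, PyHeap.toMul]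
  simp only [← Multiset.singleton_add]; abel

theorem PyHeap.toMul_evictFuel (n : Nat) : ∀ (h : PyHeap) (t : Int), h.size ≤ n →
    h.IsHeap →
    (PyHeap.evictFuel n h t).toMul = h.toMul.filter (fun x => t ≤ x)
      ∧ (PyHeap.evictFuel n h t).IsHeap := by
  induction n with
  | zero =>
      intro h t hn hh
      have := PyHeap.size_eq_zero h (by omega)
      subst this
      simp [PyHeap.evictFuel, PyHeap.toMul, PyHeap.IsHeap]
  | succ n ih =>
      intro h t hn hh
      cases h with
      | nil => simp [PyHeap.evictFuel, PyHeap.toMul, PyHeap.IsHeap]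
      | node v l r =>
        simp only [PyHeap.size] at hn
        obtain ⟨h1, h2, h3, h4⟩ := hh
        rw [PyHeap.evictFuel]
        by_cases hvt : v < t
        · simp only [hvt, if_true]
          have hsz : (PyHeap.merge l r).size ≤ n := by
            rw [PyHeap.size_merge]; omega
          obtain ⟨e1, e2⟩ := ih (PyHeap.merge l r) t hsz (PyHeap.isHeap_merge _ _ h3 h4)
          refine ⟨?_, e2⟩
          rw [e1, PyHeap.toMul_merge]
          simp only [PyHeap.toMul]
          rw [Multiset.filter_cons_of_neg _ (by omega)]
        · simp only [hvt, if_false]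
          refine ⟨?_, ⟨h1, h2, h3, h4⟩⟩
          rw [eq_comm, Multiset.filter_eq_self]
          intro x hx
          simp only [PyHeap.toMul, Multiset.mem_cons, Multiset.mem_add] at hx
          rcases hx with rfl | hx | hx
          · omega
          · have := h1 x hx; omega
          · have := h2 x hx; omega

theorem PyHeap.toMul_evict (h : PyHeap) (t : Int) (hh : h.IsHeap) :
    (PyHeap.evict h t).toMul = h.toMul.filter (fun x => t ≤ x) :=
  (PyHeap.toMul_evictFuel _ h t le_rfl hh).1

theorem PyHeap.isHeap_evict (h : PyHeap) (t : Int) (hh : h.IsHeap) :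
    (PyHeap.evict h t).IsHeap :=
  (PyHeap.toMul_evictFuel _ h t le_rfl hh).2

-- A's fold skips non-qualifying intervals, so it equals the fold over the filtered list
theorem foldl_if_filter (K : Int) (xs : List (Int × Int)) :
    ∀ s : PyHeap × Int,
    xs.foldl
      (fun (s : PyHeap × Int) p =>
        if K ≤ p.2 - p.1 then
          let h := PyHeap.evict s.1 (p.1 + K)
          (h.push p.2, s.2 + 2 ^ h.size)
        else s) s
    = (xs.filter (fun p => decide (K ≤ p.2 - p.1))).foldl
      (fun (s : PyHeap × Int) p =>
        let h := PyHeap.evict s.1 (p.1 + K)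
        (h.push p.2, s.2 + 2 ^ h.size)) s := by
  induction xs with
  | nil => intro s; rfl
  | cons p xs ih =>
      intro s
      by_cases hp : K ≤ p.2 - p.1
      · simp [hp, ih]
      · simp [hp, ih]

-- the main simulation: A's (heap, ans) fold over the qualifying sorted suffix computes the
-- same answer as B's (ans, seen) fold, as long as seen = heap contents + junk with every
-- junk element below every upcoming threshold p.1 + K
theorem main_sim (K : Int) (rest : List (Int × Int)) :
    ∀ (h : PyHeap) (seen : List Int) (ans : Int) (junk : Multiset Int),
    rest.Pairwise (fun a b => a.1 ≤ b.1) →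
    h.IsHeap →
    (seen : Multiset Int) = h.toMul + junk →
    (∀ x ∈ junk, ∀ p ∈ rest, x < p.1 + K) →
    (rest.foldl
      (fun (s : PyHeap × Int) p =>
        let h := PyHeap.evict s.1 (p.1 + K)
        (h.push p.2, s.2 + 2 ^ h.size))
      (h, ans)).2
    = (rest.foldl
      (fun (s : Int × List Int) p =>
        (s.1 + 2 ^ (s.2.countP (fun r2 => decide (p.1 + K ≤ r2))), s.2 ++ [p.2]))
      (ans, seen)).1 := by
  induction rest with
  | nil => intro h seen ans junk _ _ _ _; rfl
  | cons p rest ih =>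
      intro h seen ans junk hpw hheap hseen hjunk
      simp only [List.foldl_cons]
      have hheap' := PyHeap.isHeap_evict h (p.1 + K) hheap
      have hmul' := PyHeap.toMul_evict h (p.1 + K) hheap
      have hjz : Multiset.filter (fun x => p.1 + K ≤ x) junk = 0 := by
        rw [Multiset.filter_eq_nil]
        intro x hx
        have := hjunk x hx p (List.mem_cons_self ..)
        omega
      have hc2 : Multiset.filter (fun x => p.1 + K ≤ x) (seen : Multiset Int)
          = Multiset.filter (fun x => p.1 + K ≤ x) h.toMul := by
        rw [hseen, Multiset.filter_add, hjz, add_zero]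
      have hcount : (PyHeap.evict h (p.1 + K)).size
          = seen.countP (fun r2 => decide (p.1 + K ≤ r2)) := by
        rw [PyHeap.size_eq_card, hmul', ← hc2]
        simp [List.countP_eq_length_filter]
      rw [hcount]
      apply ih ((PyHeap.evict h (p.1 + K)).push p.2) (seen ++ [p.2]) _
        (junk + h.toMul.filter (fun x => ¬ p.1 + K ≤ x))
      · exact hpw.of_cons
      · exact PyHeap.isHeap_push _ _ hheap'
      · rw [PyHeap.toMul_push, hmul']
        have hcoe : ((seen ++ [p.2] : List Int) : Multiset Int)
            = (seen : Multiset Int) + {p.2} := rfl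
        have hs : h.toMul = Multiset.filter (fun x => p.1 + K ≤ x) h.toMul
            + Multiset.filter (fun x => ¬ p.1 + K ≤ x) h.toMul :=
          (Multiset.filter_add_not _ _).symm
        rw [hcoe, hseen]
        conv_lhs => rw [hs]
        simp only [← Multiset.singleton_add]
        abel
      · intro x hx q hq
        rcases Multiset.mem_add.mp hx with hx | hx
        · exact hjunk x hx q (List.mem_cons_of_mem _ hq)
        · have hxlt : ¬ p.1 + K ≤ x := by
            have := Multiset.of_mem_filter hx; simpa using this
          have hle : p.1 ≤ q.1 := (List.pairwise_cons.mp hpw).1 q hq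
          omega

-- ===== VERDICT (by name: the statement is the Claim_ definition above) =====
theorem solve_reference_py_spec : Claim_equal_solve_reference_py := by
  intro intervals K _
  unfold Spec_solve_reference_py solve_reference_py solve_reference_py_alt
  dsimp only
  rw [foldl_if_filter]
  apply main_sim K _ PyHeap.nil [] 0 0
  · exact ((PySem.List.sorted_pairwise intervals (fun p => p.1)).sublist
      List.filter_sublist).imp (fun h => h)
  · trivial
  · simp [PyHeap.toMul]
  · simp
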